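-- pv_equiv track=rewrite | github.com/sezikpepa/matfyz | 1. semestr/programování 1/testprogramko/testprogramko/testprogramko.py | year_offset
-- ===== SOURCE A (Python) =====
-- def lap_year(year):
--     if year % 400 == 0:
--         return True
--     elif year % 100 == 0:
--         return False
--     elif year % 4 == 0:
--         return True
--
--     return False
--
-- def year_offset(year):
--     offset = 0
--     for i in range(1, year):
--         if lap_year(i):
--             offset += 366
--         else:
--             offset += 365
--
--     return offset
-- ===== SOURCE B (Python) =====
-- def year_offset(year):
--     n = year - 1
--     if n <= 0:
--         return 0
--     return 365 * n + n // 4 - n // 100 + n // 400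
-- ===== Notes on version B (the rewrite author's own statement) =====
-- stated objective: faster
-- what changed: Replaced the per-year loop summing 365/366 by the closed-form Gregorian leap count 365*n + n//4 - n//100 + n//400 with n = year-1.
import Mathlib
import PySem

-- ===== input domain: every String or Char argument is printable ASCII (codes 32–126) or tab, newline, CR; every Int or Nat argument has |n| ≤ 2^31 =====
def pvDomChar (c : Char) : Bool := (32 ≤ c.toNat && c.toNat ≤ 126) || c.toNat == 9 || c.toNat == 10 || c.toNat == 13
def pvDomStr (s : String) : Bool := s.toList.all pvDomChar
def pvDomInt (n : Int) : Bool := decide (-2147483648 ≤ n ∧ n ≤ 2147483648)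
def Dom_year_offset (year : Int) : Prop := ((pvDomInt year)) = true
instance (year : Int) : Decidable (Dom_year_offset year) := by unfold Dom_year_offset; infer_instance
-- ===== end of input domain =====

-- B replaces A's per-year loop by the closed-form Gregorian count 365*n + n//4 - n//100 + n//400, n = year-1 (O(1) vs O(year)).

-- ===== PORT A =====
def lap_year (year : Int) : Bool :=
  if PySem.Int.mod year 400 = 0 then true
  else if PySem.Int.mod year 100 = 0 then false
  else if PySem.Int.mod year 4 = 0 then true
  else false

def year_offset (year : Int) : Int :=
  (PySem.List.pyRange 1 year 1).foldl
    (fun offset i => if lap_year i then offset + 366 else offset + 365) 0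

-- ===== PORT B =====
def year_offset_alt (year : Int) : Int :=
  let n := year - 1
  if n ≤ 0 then 0
  else 365 * n + PySem.Int.floordiv n 4 - PySem.Int.floordiv n 100 + PySem.Int.floordiv n 400

-- ===== PRECONDITION & SPEC =====
def Spec_year_offset (year : Int) (out : Int) : Prop := out = year_offset_alt year
instance (year : Int) (out : Int) : Decidable (Spec_year_offset year out) := by unfold Spec_year_offset; infer_instance

-- ===== CLAIM (what is proved, stated in full; the proofs are below) =====
def Claim_equal_year_offset : Prop := ∀ (year : Int), Dom_year_offset year → Spec_year_offset year (year_offset year)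

-- ===== LEMMAS AND PROOFS =====

lemma count_step (m : Nat) :
    ((((m+1)/4 : Nat) : Int) - ((m+1)/100 : Nat) + ((m+1)/400 : Nat))
      = (((m/4 : Nat) : Int) - (m/100 : Nat) + (m/400 : Nat))
        + (if lap_year (1 + (m : Int)) then 1 else 0) := by
  have h : (1 + (m : Int)) = ((m + 1 : Nat) : Int) := by push_cast; ring
  have m400 : PySem.Int.mod ((m + 1 : Nat) : Int) 400 = (((m + 1) % 400 : Nat) : Int) := by
    exact_mod_cast PySem.Int.mod_natCast (m + 1) 400
  have m100 : PySem.Int.mod ((m + 1 : Nat) : Int) 100 = (((m + 1) % 100 : Nat) : Int) := by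
    exact_mod_cast PySem.Int.mod_natCast (m + 1) 100
  have m4 : PySem.Int.mod ((m + 1 : Nat) : Int) 4 = (((m + 1) % 4 : Nat) : Int) := by
    exact_mod_cast PySem.Int.mod_natCast (m + 1) 4
  have h4 : (m + 1) / 4 = m / 4 + if 4 ∣ (m + 1) then 1 else 0 := Nat.succ_div
  have h100 : (m + 1) / 100 = m / 100 + if 100 ∣ (m + 1) then 1 else 0 := Nat.succ_div
  have h400 : (m + 1) / 400 = m / 400 + if 400 ∣ (m + 1) then 1 else 0 := Nat.succ_div
  unfold lap_year
  rw [h, m400, m100, m4]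
  simp only [Nat.cast_eq_zero]
  by_cases d400 : 400 ∣ (m + 1) <;> by_cases d100 : 100 ∣ (m + 1) <;> by_cases d4 : 4 ∣ (m + 1) <;>
    simp only [d400, d100, d4, if_pos, if_neg, not_false_iff] at h4 h100 h400 <;>
    rw [h4, h100, h400] <;> split_ifs <;> first | omega | simp_all

lemma loop_eq (m : Nat) :
    ((List.range m).map (fun k : Nat => (1 : Int) + (k : Int))).foldl
        (fun offset i => if lap_year i then offset + 366 else offset + 365) 0
      = 365 * m + ((((m/4 : Nat) : Int) - (m/100 : Nat) + (m/400 : Nat))) := by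
  induction m with
  | zero => simp
  | succ n ih =>
    rw [List.range_succ, List.map_append, List.foldl_append, ih, count_step n]
    by_cases h : lap_year (1 + (n : Int)) <;> simp [h] <;> omega

-- ===== VERDICT (by name: the statement is the Claim_ definition above) =====
theorem year_offset_spec : Claim_equal_year_offset := by
  intro year _
  unfold Spec_year_offset year_offset year_offset_alt
  by_cases hle : year - 1 ≤ 0
  · rw [PySem.List.pyRange_one_eq_nil (by omega)]
    simp [hle]
  · have hm : year - 1 = ((year - 1).toNat : Int) := by omega
    rw [PySem.List.pyRange_one]
    simp only [hle, if_false]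
    rw [hm]
    simp only [Int.toNat_natCast]
    have f4 : PySem.Int.floordiv (((year - 1).toNat : Nat) : Int) 4 = (((year - 1).toNat / 4 : Nat) : Int) := by
      exact_mod_cast PySem.Int.floordiv_natCast (year - 1).toNat 4
    have f1 : PySem.Int.floordiv (((year - 1).toNat : Nat) : Int) 100 = (((year - 1).toNat / 100 : Nat) : Int) := by
      exact_mod_cast PySem.Int.floordiv_natCast (year - 1).toNat 100
    have f4h : PySem.Int.floordiv (((year - 1).toNat : Nat) : Int) 400 = (((year - 1).toNat / 400 : Nat) : Int) := by
      exact_mod_cast PySem.Int.floordiv_natCast (year - 1).toNat 400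
    rw [f4, f1, f4h, loop_eq]
    ring
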